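-- pv_equiv track=rewrite | github.com/sidbhat/sap-pro-toolkit | scripts/refactor-profiles.py | determine_note_type
-- ===== SOURCE A (Python) =====
-- def determine_note_type(tags):
--     """Determine noteType from old tags array"""
--     if not tags:
--         return 'note'
--
--     tags_lower = [tag.lower() for tag in tags]
--
--     # Check for AI-related tags first (highest priority)
--     if any(tag in ['ai', 'joule', 'prompts'] for tag in tags_lower):
--         return 'ai-prompt'
--
--     # Check for code
--     if 'code' in tags_lower:
--         return 'code'
--
--     # Check for documentation
--     if any(tag in ['documentation', 'platform'] for tag in tags_lower):
--         return 'documentation'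
--
--     # Default to note
--     return 'note'
-- ===== SOURCE B (Python) =====
-- _RANK = {'ai': 0, 'joule': 0, 'prompts': 0,
--          'code': 1,
--          'documentation': 2, 'platform': 2}
-- _LABEL = ['ai-prompt', 'code', 'documentation', 'note']
--
--
-- def determine_note_type(tags):
--     """Determine noteType from old tags array"""
--     tags_lower = [tag.lower() for tag in tags]
--     best = 3
--     for t in tags_lower:
--         r = _RANK.get(t, 3)
--         if r < best:
--             best = r
--     return _LABEL[best]
-- ===== Notes on version B (the rewrite author's own statement) =====
-- stated objective: alternative
-- what changed: Replaces A's three sequential membership scans over tags_lower with one single pass that keeps the minimum priority rank from a constant tag->rank table and returns the label for the best rank.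
import Mathlib
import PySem

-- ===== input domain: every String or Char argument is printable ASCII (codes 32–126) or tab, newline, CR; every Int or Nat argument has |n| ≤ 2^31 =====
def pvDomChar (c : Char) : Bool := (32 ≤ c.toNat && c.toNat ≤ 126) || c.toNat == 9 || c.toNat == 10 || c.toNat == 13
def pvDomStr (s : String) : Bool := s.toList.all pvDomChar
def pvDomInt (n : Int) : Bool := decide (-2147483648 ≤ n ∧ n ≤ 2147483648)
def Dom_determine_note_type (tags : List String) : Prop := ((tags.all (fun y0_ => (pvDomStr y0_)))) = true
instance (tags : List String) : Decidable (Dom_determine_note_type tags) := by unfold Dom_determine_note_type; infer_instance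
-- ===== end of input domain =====

-- B replaces A's three sequential membership scans with a single pass keeping the
-- minimum priority rank from a constant tag→rank table (objective: alternative).

-- ===== PORT A =====
def determine_note_type (tags : List String) : String :=
  if tags = [] then "note"
  else
    if (tags.map PySem.Str.lower).any (fun t => (["ai", "joule", "prompts"] : List String).contains t) then "ai-prompt"
    else if (tags.map PySem.Str.lower).contains "code" then "code"
    else if (tags.map PySem.Str.lower).any (fun t => (["documentation", "platform"] : List String).contains t) then "documentation"
    else "note"

-- ===== PORT B =====
def pvRankTbl : PySem.Dict String Nat :=
  PySem.Dict.ofList [("ai", 0), ("joule", 0), ("prompts", 0), ("code", 1), ("documentation", 2), ("platform", 2)]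

def pvLabels : List String := ["ai-prompt", "code", "documentation", "note"]

def determine_note_type_alt (tags : List String) : String :=
  -- _LABEL[best]: best is always in range (0..3), so plain List.getD is exact here
  pvLabels.getD
    ((tags.map PySem.Str.lower).foldl
      (fun best t => if PySem.Dict.getD pvRankTbl t 3 < best then PySem.Dict.getD pvRankTbl t 3 else best) 3) ""

-- ===== PRECONDITION & SPEC =====
def Spec_determine_note_type (tags : List String) (out : String) : Prop := out = determine_note_type_alt tags
instance (tags : List String) (out : String) : Decidable (Spec_determine_note_type tags out) := by unfold Spec_determine_note_type; infer_instance

-- ===== CLAIM (what is proved, stated in full; the proofs are below) =====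
def Claim_equal_determine_note_type : Prop := ∀ (tags : List String), Dom_determine_note_type tags → Spec_determine_note_type tags (determine_note_type tags)

-- ===== LEMMAS AND PROOFS =====

-- the rank B's table assigns to a (lowercased) tag
def pvRk (t : String) : Nat := PySem.Dict.getD pvRankTbl t 3

theorem tbl_items : pvRankTbl.items = [("ai", 0), ("joule", 0), ("prompts", 0), ("code", 1), ("documentation", 2), ("platform", 2)] := by decide

theorem pvRk_le (t : String) : pvRk t ≤ 3 := by
  unfold pvRk PySem.Dict.getD PySem.Dict.get?
  rw [tbl_items]
  by_cases h1 : t = "ai"; · subst h1; decide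
  by_cases h2 : t = "joule"; · subst h2; decide
  by_cases h3 : t = "prompts"; · subst h3; decide
  by_cases h4 : t = "code"; · subst h4; decide
  by_cases h5 : t = "documentation"; · subst h5; decide
  by_cases h6 : t = "platform"; · subst h6; decide
  simp [beq_iff_eq, Ne.symm h1, Ne.symm h2, Ne.symm h3, Ne.symm h4, Ne.symm h5, Ne.symm h6]

theorem rk0_iff (t : String) :
    ((["ai", "joule", "prompts"] : List String).contains t) = (pvRk t == 0) := by
  unfold pvRk PySem.Dict.getD PySem.Dict.get?
  rw [tbl_items]
  by_cases h1 : t = "ai"; · subst h1; decide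
  by_cases h2 : t = "joule"; · subst h2; decide
  by_cases h3 : t = "prompts"; · subst h3; decide
  by_cases h4 : t = "code"; · subst h4; decide
  by_cases h5 : t = "documentation"; · subst h5; decide
  by_cases h6 : t = "platform"; · subst h6; decide
  simp [beq_iff_eq, Ne.symm h1, Ne.symm h2, Ne.symm h3, Ne.symm h4, Ne.symm h5, Ne.symm h6]
  exact ⟨h1, h2, h3⟩

theorem rk1_iff (t : String) : (t == "code") = (pvRk t == 1) := by
  unfold pvRk PySem.Dict.getD PySem.Dict.get?
  rw [tbl_items]
  by_cases h1 : t = "ai"; · subst h1; decide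
  by_cases h2 : t = "joule"; · subst h2; decide
  by_cases h3 : t = "prompts"; · subst h3; decide
  by_cases h4 : t = "code"; · subst h4; decide
  by_cases h5 : t = "documentation"; · subst h5; decide
  by_cases h6 : t = "platform"; · subst h6; decide
  simp [beq_iff_eq, Ne.symm h1, Ne.symm h2, Ne.symm h3, Ne.symm h4, Ne.symm h5, Ne.symm h6]
  exact h4

theorem rk2_iff (t : String) :
    ((["documentation", "platform"] : List String).contains t) = (pvRk t == 2) := by
  unfold pvRk PySem.Dict.getD PySem.Dict.get?
  rw [tbl_items]
  by_cases h1 : t = "ai"; · subst h1; decide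
  by_cases h2 : t = "joule"; · subst h2; decide
  by_cases h3 : t = "prompts"; · subst h3; decide
  by_cases h4 : t = "code"; · subst h4; decide
  by_cases h5 : t = "documentation"; · subst h5; decide
  by_cases h6 : t = "platform"; · subst h6; decide
  simp [beq_iff_eq, Ne.symm h1, Ne.symm h2, Ne.symm h3, Ne.symm h4, Ne.symm h5, Ne.symm h6]
  exact ⟨h5, h6⟩

-- the value of A's if-chain, as a rank
def pvChain (l : List String) : Nat :=
  if l.any (fun t => pvRk t == 0) then 0
  else if l.any (fun t => pvRk t == 1) then 1
  else if l.any (fun t => pvRk t == 2) then 2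
  else 3

theorem pvChain_le (l : List String) : pvChain l ≤ 3 := by
  unfold pvChain; split_ifs <;> omega

-- B's fold computes min of the start value and the chain rank
theorem fold_eq_chain (l : List String) :
    ∀ b : Nat, b ≤ 3 → l.foldl (fun best t => if pvRk t < best then pvRk t else best) b
      = min b (pvChain l) := by
  induction l with
  | nil => intro b hb; simp [pvChain, Nat.min_eq_left hb]
  | cons a l ih =>
    intro b hb
    simp only [List.foldl_cons]
    have ha := pvRk_le a
    have hc := pvChain_le l
    rw [ih _ (by split_ifs <;> omega)]
    unfold pvChain
    simp only [List.any_cons]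
    rcases Nat.lt_or_ge (pvRk a) 1 with h0 | h0
    · have : pvRk a = 0 := by omega
      simp [this]
    rcases Nat.lt_or_ge (pvRk a) 2 with h1 | h1
    · have : pvRk a = 1 := by omega
      simp [this]; split_ifs <;> omega
    rcases Nat.lt_or_ge (pvRk a) 3 with h2 | h2
    · have : pvRk a = 2 := by omega
      simp [this]; split_ifs <;> omega
    · have : pvRk a = 3 := by omega
      simp [this]; split_ifs <;> omega

-- ===== VERDICT (by name: the statement is the Claim_ definition above) =====
theorem determine_note_type_spec : Claim_equal_determine_note_type := by
  intro tags _
  show determine_note_type tags = determine_note_type_alt tags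
  unfold determine_note_type determine_note_type_alt
  have hfold := fold_eq_chain (tags.map PySem.Str.lower) 3 (by omega)
  simp only [pvRk] at hfold
  rw [hfold]
  have hc := pvChain_le (tags.map PySem.Str.lower)
  have hmin : min 3 (pvChain (tags.map PySem.Str.lower)) = pvChain (tags.map PySem.Str.lower) := by omega
  rw [hmin]
  by_cases hnil : tags = []
  · subst hnil; simp [pvChain, pvLabels]
  · simp only [if_neg hnil]
    unfold pvChain
    have e0 : ∀ t : String, ((["ai", "joule", "prompts"] : List String).contains t) = (pvRk t == 0) := rk0_iff
    have e2 : ∀ t : String, ((["documentation", "platform"] : List String).contains t) = (pvRk t == 2) := rk2_iff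
    have e1 : (tags.map PySem.Str.lower).contains "code"
        = (tags.map PySem.Str.lower).any (fun t => pvRk t == 1) := by
      simp only [List.contains_eq_any_beq]
      refine List.any_congr rfl (fun t => ?_)
      rw [← rk1_iff]
      simp [eq_comm]
    simp only [e0, e2, e1]
    split_ifs <;> simp [pvLabels]
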